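-- pv_equiv track=rewrite | github.com/Guillermo-Gil-Garro/GITSTER | pipeline/canonicalize/canonicalize_and_registry.py | choose_mode
-- ===== SOURCE A (Python) =====
-- from collections import Counter
-- from typing import Dict, Tuple, List
--
-- def norm(s: str) -> str:
--     s = "" if s is None else str(s)
--     s = s.strip()
--     s = " ".join(s.split())
--     return s
--
-- def choose_mode(values: List[str]) -> str:
--     vals = [norm(v) for v in values if norm(v)]
--     if not vals:
--         return ""
--     c = Counter(vals)
--     # mode; tie-break: lexicográfico
--     top = max(c.values())
--     best = sorted([v for v, n in c.items() if n == top])[0]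
--     return best
-- ===== SOURCE B (Python) =====
-- def norm(s: str) -> str:
--     s = "" if s is None else str(s)
--     s = s.strip()
--     s = " ".join(s.split())
--     return s
--
-- def choose_mode(values):
--     # sort the normalized values, then scan consecutive runs once;
--     # the first run reaching the maximal length is the lexicographically
--     # smallest mode, so strict '>' reproduces the tie-break.
--     vals = sorted(x for x in (norm(v) for v in values) if x)
--     if not vals:
--         return ""
--     best, best_n = "", 0
--     i, n = 0, len(vals)
--     while i < n:
--         j = i + 1
--         while j < n and vals[j] == vals[i]:
--             j += 1
--         if j - i > best_n:
--             best, best_n = vals[i], j - i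
--         i = j
--     return best
-- ===== Notes on version B (the rewrite author's own statement) =====
-- stated objective: alternative
-- what changed: Replaces the Counter + max(values) + filter-items + sort-and-take-first pipeline by sorting the normalized values once and scanning consecutive equal runs, keeping the first run of maximal length (strict '>'), which is the lexicographically smallest mode.
import Mathlib
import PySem

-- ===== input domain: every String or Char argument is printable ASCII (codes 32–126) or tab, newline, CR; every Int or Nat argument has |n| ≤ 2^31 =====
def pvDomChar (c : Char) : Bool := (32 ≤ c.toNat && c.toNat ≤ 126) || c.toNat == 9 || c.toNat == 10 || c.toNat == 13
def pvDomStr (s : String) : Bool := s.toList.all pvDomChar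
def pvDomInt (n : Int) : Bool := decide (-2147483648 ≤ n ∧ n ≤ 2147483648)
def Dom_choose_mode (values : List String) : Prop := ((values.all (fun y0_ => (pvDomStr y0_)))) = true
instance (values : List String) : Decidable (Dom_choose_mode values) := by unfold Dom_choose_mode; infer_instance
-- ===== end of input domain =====

-- B replaces A's Counter + max + filter + sort pipeline by a single run-length
-- scan over the sorted normalized values (objective: alternative decomposition).

-- ===== PORT A =====
-- norm(s): strip, collapse whitespace with " ".join(s.split())
def pvNorm (s : String) : String :=
  PySem.Str.join " " (PySem.Str.split₀ (PySem.Str.strip s))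

def choose_mode (values : List String) : String :=
  let vals := (values.map pvNorm).filter (fun v => v ≠ "")
  if vals = [] then ""
  else
    let c := PySem.Dict.counter vals
    let top := (PySem.List.max? c.values (fun y => y)).getD 0
    let cand := (c.items.filter (fun p => p.2 = top)).map (fun p => p.1)
    (PySem.List.sorted cand (fun x => x) false).headD ""   -- sorted(...)[0]; list provably nonempty

-- ===== PORT B =====
-- the while-loop over runs of equal values in the sorted list
def pvScan : List String → String → Nat → String
  | [], best, _ => best
  | x :: rest, best, bestn =>
    let run := 1 + (rest.takeWhile (fun y => y == x)).length
    let rest' := rest.dropWhile (fun y => y == x)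
    if bestn < run then pvScan rest' x run else pvScan rest' best bestn
termination_by s => s.length
decreasing_by
  all_goals
    simp only [List.length_cons]
    exact Nat.lt_succ_of_le (List.length_dropWhile_le _ _)

def choose_mode_alt (values : List String) : String :=
  let vals := (values.map pvNorm).filter (fun v => v ≠ "")
  if vals = [] then ""
  else pvScan (PySem.List.sorted vals (fun x => x) false) "" 0

-- ===== PRECONDITION & SPEC =====
def Spec_choose_mode (values : List String) (out : String) : Prop := out = choose_mode_alt values
instance (values : List String) (out : String) : Decidable (Spec_choose_mode values out) := by unfold Spec_choose_mode; infer_instance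

-- ===== CLAIM (what is proved, stated in full; the proofs are below) =====
def Claim_equal_choose_mode : Prop := ∀ (values : List String), Dom_choose_mode values → Spec_choose_mode values (choose_mode values)

-- ===== LEMMAS AND PROOFS =====

theorem pv_find?_congr {α : Type} (p q : α → Bool) (l : List α) (h : ∀ v ∈ l, p v = q v) :
    l.find? p = l.find? q := by
  induction l with
  | nil => rfl
  | cons a t ih =>
    simp only [List.find?_cons]
    rw [h a List.mem_cons_self]
    cases q a
    · exact ih (fun v hv => h v (List.mem_cons_of_mem a hv))
    · rfl

theorem pv_find?_skip (p : String → Bool) (x : String) (tk dr : List String)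
    (htk : ∀ y ∈ tk, y = x) (hpx : p x = false) :
    List.find? p (x :: (tk ++ dr)) = dr.find? p := by
  induction tk with
  | nil => simp [hpx]
  | cons a t ih =>
    have ha : a = x := htk a List.mem_cons_self
    subst ha
    have h2 := ih (fun y hy => htk y (List.mem_cons_of_mem _ hy))
    simp only [List.find?_cons, hpx, List.cons_append] at h2 ⊢
    exact h2
def pvM (s : List String) : Nat := (s.map (fun v => s.count v)).foldr max 0

theorem pv_foldr_max_le_iff (l : List Nat) (n : Nat) : l.foldr max 0 ≤ n ↔ ∀ x ∈ l, x ≤ n := by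
  induction l with
  | nil => simp
  | cons x t ih => simp [ih]

theorem pv_foldr_max_mem (l : List Nat) : l.foldr max 0 = 0 ∨ l.foldr max 0 ∈ l := by
  induction l with
  | nil => simp
  | cons x t ih =>
    rcases Nat.le_total x (t.foldr max 0) with h | h
    · rcases ih with h0 | hm
      · left; simp [List.foldr, h0]; omega
      · right; simp only [List.foldr]; rw [Nat.max_eq_right h]; exact List.mem_cons_of_mem _ hm
    · right; simp only [List.foldr]; rw [Nat.max_eq_left h]; exact List.mem_cons_self
theorem pvM_le_iff (s : List String) (n : Nat) :
    pvM s ≤ n ↔ ∀ v ∈ s, s.count v ≤ n := by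
  unfold pvM; rw [pv_foldr_max_le_iff]; simp

theorem count_le_pvM (s : List String) (v : String) (hv : v ∈ s) : s.count v ≤ pvM s :=
  (pvM_le_iff s (pvM s)).1 le_rfl v hv

theorem exists_count_eq_pvM (s : List String) (hs : s ≠ []) : ∃ v ∈ s, s.count v = pvM s := by
  rcases pv_foldr_max_mem (s.map (fun v => s.count v)) with h0 | hm
  · rcases List.exists_mem_of_ne_nil s hs with ⟨v, hv⟩
    have h1 := count_le_pvM s v hv
    have h2 : 0 < s.count v := List.count_pos_iff.2 hv
    have h3 : pvM s = 0 := h0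
    omega
  · rcases List.mem_map.1 hm with ⟨v, hv, hev⟩
    exact ⟨v, hv, hev⟩

theorem pvM_perm {s t : List String} (h : s.Perm t) : pvM s = pvM t := by
  apply Nat.le_antisymm
  · rw [pvM_le_iff]; intro v hv
    rw [h.count_eq]; exact count_le_pvM t v (h.mem_iff.1 hv)
  · rw [pvM_le_iff]; intro v hv
    rw [← h.count_eq]; exact count_le_pvM s v (h.mem_iff.2 hv)

theorem pvScan_spec_aux : ∀ (n : Nat) (s : List String), s.length ≤ n → s.Pairwise (· ≤ ·) →
    ∀ (best : String) (bestn : Nat),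
    pvScan s best bestn =
      if bestn < pvM s then (s.find? (fun v => s.count v == pvM s)).getD best else best := by
  intro n
  induction n with
  | zero =>
    intro s hlen _ best bestn
    have : s = [] := List.eq_nil_of_length_eq_zero (Nat.le_zero.1 hlen)
    subst this
    simp [pvScan, pvM]
  | succ n ih =>
    intro s hlen hs best bestn
    match s with
    | [] => simp [pvScan, pvM]
    | x :: rest =>
      -- abbreviations
      set tk := rest.takeWhile (fun y => y == x) with htk_def
      set dr := rest.dropWhile (fun y => y == x) with hdr_def
      have hrest : tk ++ dr = rest := List.takeWhile_append_dropWhile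
      have htkx : ∀ y ∈ tk, y = x := by
        intro y hy
        simpa using List.mem_takeWhile_imp hy
      have hxle : ∀ y ∈ rest, x ≤ y := (List.pairwise_cons.1 hs).1
      have hrs : rest.Pairwise (· ≤ ·) := (List.pairwise_cons.1 hs).2
      have hdrsub : dr.Sublist rest := List.dropWhile_sublist _
      have hdrsort : dr.Pairwise (· ≤ ·) := List.Pairwise.sublist hdrsub hrs
      have hxdr : x ∉ dr := by
        intro hx
        have hdrne : dr ≠ [] := List.ne_nil_of_mem hx
        have hh := List.head_dropWhile_not (fun y => y == x) (hdr_def ▸ hdrne)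
        have hhx : dr.head hdrne ≠ x := by simpa using hh
        have hhmem : dr.head hdrne ∈ rest := hdrsub.mem (List.head_mem _)
        have hxh : x ≤ dr.head hdrne := hxle _ hhmem
        have hcons := List.cons_head_tail hdrne
        rw [← hcons] at hdrsort hx
        rcases List.mem_cons.1 hx with h1 | h1
        · exact hhx h1.symm
        · have := (List.pairwise_cons.1 hdrsort).1 x h1
          exact hhx (le_antisymm this hxh)
      have hctk : tk.count x = tk.length := by
        rw [List.count_eq_length]
        intro b hb
        simpa using (htkx b hb).symm
      have hcx : (x :: rest).count x = 1 + tk.length := by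
        rw [List.count_cons_self, ← hrest, List.count_append, hctk,
            List.count_eq_zero.2 hxdr]
        omega
      have hcv : ∀ v, v ≠ x → (x :: rest).count v = dr.count v := by
        intro v hv
        rw [List.count_cons_of_ne (Ne.symm hv), ← hrest, List.count_append,
            List.count_eq_zero.2 (fun hm => hv (htkx v hm)), Nat.zero_add]
      have hmemdr : ∀ v, v ∈ x :: rest → v ≠ x → v ∈ dr := by
        intro v hv hne
        rcases List.mem_cons.1 hv with h1 | h1
        · exact absurd h1 hne
        · rw [← hrest] at h1
          rcases List.mem_append.1 h1 with h2 | h2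
          · exact absurd (htkx v h2) hne
          · exact h2
      have hsubs : dr.Sublist (x :: rest) := hdrsub.cons x
      have hM : pvM (x :: rest) = max (1 + tk.length) (pvM dr) := by
        apply Nat.le_antisymm
        · rw [pvM_le_iff]
          intro v hv
          by_cases hvx : v = x
          · subst hvx; rw [hcx]; exact Nat.le_max_left _ _
          · rw [hcv v hvx]
            exact Nat.le_trans (count_le_pvM dr v (hmemdr v hv hvx)) (Nat.le_max_right _ _)
        · apply Nat.max_le.2
          constructor
          · rw [← hcx]; exact count_le_pvM _ x List.mem_cons_self
          · rw [pvM_le_iff]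
            intro v hv
            exact Nat.le_trans (hsubs.count_le v) (count_le_pvM _ v (hsubs.mem hv))
      have hdrlen : dr.length ≤ n := by
        have h5 := List.length_dropWhile_le (fun y => y == x) rest
        rw [← hdr_def] at h5
        simp only [List.length_cons] at hlen
        omega
      have hIH := ih dr hdrlen hdrsort
      -- the find? over s, with all tk elements equal to x
      have hshape : x :: rest = x :: (tk ++ dr) := by rw [hrest]
      rw [pvScan]
      by_cases hb1 : bestn < 1 + tk.length
      · rw [if_pos hb1, hIH x (1 + tk.length)]
        by_cases hb2 : 1 + tk.length < pvM dr
        · -- max found inside dr; x is not it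
          have hMs : pvM (x :: rest) = pvM dr := by rw [hM]; omega
          have hpx : (((x :: rest).count x == pvM (x :: rest)) : Bool) = false := by
            rw [hcx, hMs]; simp; omega
          rw [if_pos hb2, if_pos (by rw [hMs]; omega)]
          rw [hshape, pv_find?_skip _ x tk dr htkx (by rw [← hshape]; exact hpx), hrest]
          have hfc : dr.find? (fun v => (x :: rest).count v == pvM (x :: rest))
              = dr.find? (fun v => dr.count v == pvM dr) := by
            apply pv_find?_congr
            intro v hv
            rw [hcv v (fun h => hxdr (h ▸ hv)), hMs]
          rw [hfc]
          -- find? is some: dr has an element of maximal count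
          have hdrne : dr ≠ [] := by
            intro h; rw [h] at hb2; simp [pvM] at hb2
          rcases exists_count_eq_pvM dr hdrne with ⟨m, hm, hcm⟩
          rcases hfind : dr.find? (fun v => dr.count v == pvM dr) with _ | m'
          · exfalso
            have := List.find?_eq_none.1 hfind m hm
            simp [hcm] at this
          · rfl
        · -- the run of x is the (first) maximum
          rw [if_neg hb2]
          have hMs : pvM (x :: rest) = 1 + tk.length := by rw [hM]; omega
          have hpx : (((x :: rest).count x == pvM (x :: rest)) : Bool) = true := by
            rw [hcx, hMs]; simp
          rw [if_pos (by rw [hMs]; omega), List.find?_cons_of_pos (p := fun v => List.count v (x :: rest) == pvM (x :: rest)) hpx]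
          rfl
      · rw [if_neg hb1, hIH best bestn]
        by_cases hb2 : bestn < pvM dr
        · have hMs : pvM (x :: rest) = pvM dr := by rw [hM]; omega
          have hpx : (((x :: rest).count x == pvM (x :: rest)) : Bool) = false := by
            rw [hcx, hMs]; simp; omega
          rw [if_pos hb2, if_pos (by rw [hMs]; omega)]
          rw [hshape, pv_find?_skip _ x tk dr htkx (by rw [← hshape]; exact hpx), hrest]
          have hfc : dr.find? (fun v => (x :: rest).count v == pvM (x :: rest))
              = dr.find? (fun v => dr.count v == pvM dr) := by
            apply pv_find?_congr
            intro v hv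
            rw [hcv v (fun h => hxdr (h ▸ hv)), hMs]
          rw [hfc]
        · rw [if_neg hb2, if_neg (by rw [hM]; omega)]

theorem pvScan_spec (s : List String) (hs : s.Pairwise (· ≤ ·)) (best : String) (bestn : Nat) :
    pvScan s best bestn =
      if bestn < pvM s then (s.find? (fun v => s.count v == pvM s)).getD best else best :=
  pvScan_spec_aux s.length s le_rfl hs best bestn

def pvIsLeastMode (L : List String) (m : String) : Prop :=
  m ∈ L ∧ L.count m = pvM L ∧ ∀ v ∈ L, L.count v = pvM L → m ≤ v

theorem pvLeast_unique {L : List String} {a b : String}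
    (ha : pvIsLeastMode L a) (hb : pvIsLeastMode L b) : a = b :=
  le_antisymm (ha.2.2 b hb.1 hb.2.1) (hb.2.2 a ha.1 ha.2.1)

theorem pvM_pos {L : List String} (hL : L ≠ []) : 0 < pvM L := by
  rcases List.exists_mem_of_ne_nil L hL with ⟨v, hv⟩
  have h1 : 0 < L.count v := List.count_pos_iff.2 hv
  exact Nat.lt_of_lt_of_le h1 (count_le_pvM L v hv)

theorem A_char (L : List String) (hL : L ≠ []) :
    pvIsLeastMode L ((PySem.List.sorted
      (((PySem.Dict.counter L).items.filter
          (fun p => p.2 = (PySem.List.max? (PySem.Dict.counter L).values (fun y => y)).getD 0)).map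
        (fun p => p.1)) (fun x => x) false).headD "") := by
  have hitems := PySem.Dict.items_counter L
  have hvals : (PySem.Dict.counter L).values
      = (PySem.Set.ofList L : List String).map (fun k => ((L.count k : Int))) := by
    simp [PySem.Dict.values, hitems, List.map_map, Function.comp]
  have hofne : (PySem.Set.ofList L : List String) ≠ [] := by
    rcases List.exists_mem_of_ne_nil L hL with ⟨v, hv⟩
    exact List.ne_nil_of_mem ((PySem.Set.mem_ofList L v).2 hv)
  have htop : (PySem.List.max? (PySem.Dict.counter L).values (fun y => y)).getD 0 = (pvM L : Int) := by
    rcases hmx : PySem.List.max? (PySem.Dict.counter L).values (fun y => y) with _ | mv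
    · rw [PySem.List.max?_eq_none_iff] at hmx
      rw [hvals] at hmx
      exact absurd (List.map_eq_nil_iff.1 hmx) hofne
    · have hmem := PySem.List.max?_mem hmx
      have hmax := PySem.List.max?_isMax hmx
      rw [hvals] at hmem hmax
      rcases List.mem_map.1 hmem with ⟨k0, hk0, hk0e⟩
      have hk0L : k0 ∈ L := (PySem.Set.mem_ofList L k0).1 hk0
      have h1 : (mv : Int) ≤ (pvM L : Int) := by
        rw [← hk0e]
        exact_mod_cast count_le_pvM L k0 hk0L
      have h2 : (pvM L : Int) ≤ mv := by
        rcases exists_count_eq_pvM L hL with ⟨v0, hv0, hcv0⟩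
        have hmem0 : ((L.count v0 : Int)) ∈ (PySem.Set.ofList L : List String).map (fun k => ((L.count k : Int))) :=
          List.mem_map.2 ⟨v0, (PySem.Set.mem_ofList L v0).2 hv0, rfl⟩
        have := hmax _ hmem0
        rw [hcv0] at this
        exact this
      simp only [Option.getD_some]
      exact le_antisymm h1 h2
  have hpredeq : ∀ k, (decide (((L.count k : Int)) = (pvM L : Int))) = (L.count k == pvM L) := by
    intro k
    rw [Bool.eq_iff_iff, decide_eq_true_iff, beq_iff_eq]
    exact_mod_cast Iff.rfl
  have hcand : ((PySem.Dict.counter L).items.filter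
          (fun p => p.2 = (PySem.List.max? (PySem.Dict.counter L).values (fun y => y)).getD 0)).map
        (fun p => p.1)
      = (PySem.Set.ofList L : List String).filter (fun k => L.count k == pvM L) := by
    rw [hitems, htop, List.filter_map, List.map_map]
    simp only [Function.comp_def, Nat.cast_inj]
    rw [List.map_id']
    apply List.filter_congr
    intro k _
    rw [Bool.eq_iff_iff, decide_eq_true_iff, beq_iff_eq]
  rw [hcand]
  set C := (PySem.Set.ofList L : List String).filter (fun k => L.count k == pvM L) with hC
  rcases exists_count_eq_pvM L hL with ⟨v0, hv0, hcv0⟩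
  have hv0C : v0 ∈ C := by
    rw [hC, List.mem_filter]
    exact ⟨(PySem.Set.mem_ofList L v0).2 hv0, by rw [hcv0]; simp⟩
  rcases hsC : PySem.List.sorted C (fun x => x) false with _ | ⟨m, t⟩
  · rw [PySem.List.sorted_eq_nil_iff] at hsC
    exact absurd hsC (List.ne_nil_of_mem hv0C)
  · have hmC : m ∈ C := by
      rw [← PySem.List.mem_sorted C (fun x => x) false m, hsC]
      exact List.mem_cons_self
    have hm1 : m ∈ L := (PySem.Set.mem_ofList L m).1 (List.mem_filter.1 hmC).1
    have hm2 : L.count m = pvM L := beq_iff_eq.1 (List.mem_filter.1 hmC).2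
    refine ⟨by simpa using hm1, by simpa using hm2, ?_⟩
    intro v hv hcv
    have hvC : v ∈ C := by
      rw [hC, List.mem_filter]
      exact ⟨(PySem.Set.mem_ofList L v).2 hv, by rw [hcv]; simp⟩
    have := PySem.List.key_head_sorted_le C (fun x => x) hsC v hvC
    simpa using this

theorem B_char (L : List String) (hL : L ≠ []) :
    pvIsLeastMode L (pvScan (PySem.List.sorted L (fun x => x) false) "" 0) := by
  have hperm : (PySem.List.sorted L (fun x => x) false).Perm L := PySem.List.sorted_perm L _ _
  have hpw : (PySem.List.sorted L (fun x => x) false).Pairwise (· ≤ ·) := by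
    simpa using PySem.List.sorted_pairwise L (fun x => x)
  set sL := PySem.List.sorted L (fun x => x) false with hsL
  have hMe : pvM sL = pvM L := pvM_perm hperm
  have hce : ∀ v, sL.count v = L.count v := fun v => hperm.count_eq v
  rw [pvScan_spec sL hpw "" 0, if_pos (by rw [hMe]; exact pvM_pos hL)]
  rw [← List.head?_filter]
  rcases hflt : sL.filter (fun v => sL.count v == pvM sL) with _ | ⟨m, t⟩
  · exfalso
    rcases exists_count_eq_pvM L hL with ⟨v, hv, hcv⟩
    have hvm : v ∈ sL.filter (fun v => sL.count v == pvM sL) := by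
      rw [List.mem_filter]
      exact ⟨hperm.mem_iff.2 hv, by rw [hce, hMe, hcv]; simp⟩
    rw [hflt] at hvm
    simp at hvm
  · have hm : m ∈ sL.filter (fun v => sL.count v == pvM sL) := by rw [hflt]; exact List.mem_cons_self
    have hm1 : m ∈ L := hperm.mem_iff.1 (List.mem_filter.1 hm).1
    have hm2 : L.count m = pvM L := by
      have := (List.mem_filter.1 hm).2
      rw [hce, hMe] at this
      exact beq_iff_eq.1 this
    refine ⟨hm1, hm2, ?_⟩
    intro v hv hcv
    have hvm : v ∈ sL.filter (fun v => sL.count v == pvM sL) := by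
      rw [List.mem_filter]
      exact ⟨hperm.mem_iff.2 hv, by rw [hce, hMe, hcv]; simp⟩
    rw [hflt] at hvm
    have hfpw : (sL.filter (fun v => sL.count v == pvM sL)).Pairwise (· ≤ ·) :=
      List.Pairwise.sublist List.filter_sublist hpw
    rw [hflt] at hfpw
    rcases List.mem_cons.1 hvm with h1 | h1
    · simp [h1, List.head?]
    · simp only [List.head?]
      exact (List.pairwise_cons.1 hfpw).1 v h1

-- ===== VERDICT (by name: the statement is the Claim_ definition above) =====
theorem choose_mode_spec : Claim_equal_choose_mode := by
  intro values _
  unfold Spec_choose_mode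
  show choose_mode values = choose_mode_alt values
  simp only [choose_mode, choose_mode_alt]
  split_ifs with h
  · rfl
  · exact pvLeast_unique (A_char _ h) (B_char _ h)
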